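-- pv_equiv track=rewrite | github.com/J-Manoj-06/discord | utils/formatter.py | chunked_lines
-- ===== SOURCE A (Python) =====
-- from typing import Iterable
--
-- def chunked_lines(items: Iterable[str], chunk_size: int = 10) -> list[str]:
--     buffer = []
--     current = []
--     for item in items:
--         current.append(item)
--         if len(current) == chunk_size:
--             buffer.append("\n".join(current))
--             current = []
--     if current:
--         buffer.append("\n".join(current))
--     return buffer
-- ===== SOURCE B (Python) =====
-- def chunked_lines(items, chunk_size=10):
--     data = list(items)
--     if chunk_size <= 0:
--         # A's accumulator never flushes for non-positive chunk_size: one big chunk.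
--         return ["\n".join(data)] if data else []
--     return ["\n".join(data[i:i + chunk_size]) for i in range(0, len(data), chunk_size)]
-- ===== Notes on version B (the rewrite author's own statement) =====
-- stated objective: idiomatic
-- what changed: Replaces A's per-item append/length-check/flush accumulator loop with a single index-stepped slicing comprehension over the materialized list (range(0, len(data), chunk_size)), with the non-positive chunk_size case (one big chunk) handled explicitly.
import Mathlib
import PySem

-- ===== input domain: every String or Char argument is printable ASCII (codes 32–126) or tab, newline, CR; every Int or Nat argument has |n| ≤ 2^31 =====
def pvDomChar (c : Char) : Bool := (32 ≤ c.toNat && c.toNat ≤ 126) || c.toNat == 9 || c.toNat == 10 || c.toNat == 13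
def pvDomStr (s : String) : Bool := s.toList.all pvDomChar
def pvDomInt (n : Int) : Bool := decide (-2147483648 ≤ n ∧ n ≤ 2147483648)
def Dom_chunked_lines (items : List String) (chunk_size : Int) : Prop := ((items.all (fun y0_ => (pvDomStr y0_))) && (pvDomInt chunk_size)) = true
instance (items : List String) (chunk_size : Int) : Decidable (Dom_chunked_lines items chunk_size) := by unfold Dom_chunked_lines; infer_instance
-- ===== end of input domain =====

-- B replaces A's append/flush accumulator loop with index-stepped slicing over the list; objective: idiomatic (same cost).

-- ===== PORT A =====
def chunked_lines (items : List String) (chunk_size : Int) : List String :=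
  -- buffer = []; current = []; for item in items: …
  let s := items.foldl (fun (s : List String × List String) item =>
      let current := s.2 ++ [item]
      if (current.length : Int) = chunk_size then
        (s.1 ++ [PySem.Str.join "\n" current], [])
      else (s.1, current))
    ([], [])
  -- if current: buffer.append("\n".join(current))
  if s.2 ≠ [] then s.1 ++ [PySem.Str.join "\n" s.2] else s.1

-- ===== PORT B =====
def chunked_lines_alt (items : List String) (chunk_size : Int) : List String :=
  let data := items
  if chunk_size ≤ 0 then
    if data = [] then [] else [PySem.Str.join "\n" data]
  else
    (PySem.List.pyRange 0 (data.length : Int) chunk_size).map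
      (fun i => PySem.Str.join "\n" (PySem.List.slice data (some i) (some (i + chunk_size))))

-- ===== PRECONDITION & SPEC =====
def Spec_chunked_lines (items : List String) (chunk_size : Int) (out : List String) : Prop := out = chunked_lines_alt items chunk_size
instance (items : List String) (chunk_size : Int) (out : List String) : Decidable (Spec_chunked_lines items chunk_size out) := by unfold Spec_chunked_lines; infer_instance

-- ===== CLAIM (what is proved, stated in full; the proofs are below) =====
def Claim_equal_chunked_lines : Prop := ∀ (items : List String) (chunk_size : Int), Dom_chunked_lines items chunk_size → Spec_chunked_lines items chunk_size (chunked_lines items chunk_size)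

-- ===== LEMMAS AND PROOFS =====

-- reference decomposition: successive blocks of n elements (n ≥ 1 in all uses)
def chunksOf (n : Nat) (l : List String) : List (List String) :=
  if l = [] then [] else l.take n :: chunksOf n (l.tail.drop (n - 1))
termination_by l.length
decreasing_by
  cases l with
  | nil => simp_all
  | cons x xs => simp

theorem chunksOf_nil (n : Nat) : chunksOf n [] = [] := by
  unfold chunksOf; simp

theorem chunksOf_cons (n : Nat) (hn : 0 < n) (l : List String) (hl : l ≠ []) :
    chunksOf n l = l.take n :: chunksOf n (l.drop n) := by
  conv_lhs => unfold chunksOf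
  rw [if_neg hl]
  congr 1
  cases l with
  | nil => exact absurd rfl hl
  | cons x xs =>
    obtain ⟨m, rfl⟩ : ∃ m, n = m + 1 := ⟨n - 1, by omega⟩
    simp

theorem chunksOf_short (n : Nat) (l : List String) (hl : l ≠ []) (h : l.length ≤ n) (hn : 0 < n) :
    chunksOf n l = [l] := by
  rw [chunksOf_cons n hn l hl, List.take_of_length_le h, List.drop_eq_nil_of_le h, chunksOf_nil]

-- step equation of a positive-step pyRange
theorem pyRange_pos_cons (a b s : Int) (hs : 0 < s) (hab : a < b) :
    PySem.List.pyRange a b s = a :: PySem.List.pyRange (a + s) b s := by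
  rw [PySem.List.pyRange_of_pos _ _ hs, PySem.List.pyRange_of_pos _ _ hs, if_pos hab]
  by_cases h2 : a + s < b
  · rw [if_pos h2]
    have hq : (b - a + s - 1) / s = (b - a - 1) / s + 1 := by
      have he : b - a + s - 1 = (b - a - 1) + 1 * s := by ring
      rw [he, Int.add_mul_ediv_right _ _ (ne_of_gt hs)]
    have hnn : 0 ≤ (b - a - 1) / s := Int.ediv_nonneg (by omega) (le_of_lt hs)
    have htn : ((b - a + s - 1) / s).toNat = ((b - a - 1) / s).toNat + 1 := by omega
    have he2 : b - (a + s) + s - 1 = b - a - 1 := by ring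
    rw [htn, he2, List.range_succ_eq_map, List.map_cons, List.map_map]
    congr 1
    · norm_num
    · apply List.map_congr_left
      intro k _
      simp [Function.comp, Nat.succ_eq_add_one]
      ring
  · rw [if_neg h2]
    have h1 : (b - a + s - 1) / s = 1 := by
      have lo : 1 ≤ (b - a + s - 1) / s := by
        rw [Int.le_ediv_iff_mul_le hs]; omega
      have hi : (b - a + s - 1) / s < 2 := by
        rw [Int.ediv_lt_iff_lt_mul hs]; omega
      omega
    rw [h1]
    simp

theorem pyRange_pos_nil (a b s : Int) (hs : 0 < s) (hab : b ≤ a) :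
    PySem.List.pyRange a b s = [] := by
  rw [PySem.List.pyRange_of_pos _ _ hs, if_neg (by omega)]
  simp

-- B-side: the stepped range of slices computes the chunks of the remaining suffix
theorem alt_aux (data : List String) (n : Nat) (hn : 0 < n) :
    ∀ a : Nat,
      (PySem.List.pyRange (a : Int) (data.length : Int) (n : Int)).map
        (fun i => PySem.Str.join "\n" (PySem.List.slice data (some i) (some (i + (n : Int)))))
      = (chunksOf n (data.drop a)).map (PySem.Str.join "\n") := by
  intro a
  by_cases h : a < data.length
  · rw [pyRange_pos_cons _ _ _ (by exact_mod_cast hn) (by exact_mod_cast h), List.map_cons]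
    have hstep : ((a : Int) + (n : Int)) = (((a + n : Nat)) : Int) := by push_cast; ring
    rw [hstep, alt_aux data n hn (a + n)]
    have hslice : PySem.List.slice data (some (a : Int)) (some ((a : Int) + (n : Int)))
        = (data.drop a).take n := PySem.List.slice_natCast_add data a n
    rw [← hstep, hslice]
    have hne : data.drop a ≠ [] := by
      intro hnil
      have := List.drop_eq_nil_iff.mp hnil
      omega
    rw [chunksOf_cons n hn _ hne, List.map_cons, List.drop_drop]
  · rw [pyRange_pos_nil _ _ _ (by exact_mod_cast hn) (by exact_mod_cast (by omega : data.length ≤ a)),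
        List.drop_eq_nil_of_le (by omega), chunksOf_nil]
    simp
termination_by a => data.length - a
decreasing_by omega

-- A-side: the accumulator loop, finished with the flush, computes the same chunks
theorem a_aux (n : Nat) (hn : 0 < n) :
    ∀ (xs cur buffer : List String), cur.length < n →
      (fun (s : List String × List String) =>
        if s.2 ≠ [] then s.1 ++ [PySem.Str.join "\n" s.2] else s.1)
      (xs.foldl (fun (s : List String × List String) item =>
          let current := s.2 ++ [item]
          if (current.length : Int) = (n : Int) then
            (s.1 ++ [PySem.Str.join "\n" current], [])
          else (s.1, current)) (buffer, cur))
      = buffer ++ (chunksOf n (cur ++ xs)).map (PySem.Str.join "\n") := by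
  intro xs
  induction xs with
  | nil =>
    intro cur buffer hcur
    simp only [List.foldl_nil, List.append_nil]
    by_cases hc : cur = []
    · subst hc; simp [chunksOf_nil]
    · rw [chunksOf_short n cur hc (le_of_lt hcur) hn]
      simp [hc]
  | cons x xs ih =>
    intro cur buffer hcur
    simp only [List.foldl_cons]
    by_cases hfull : ((cur ++ [x]).length : Int) = (n : Int)
    · have hlen : (cur ++ [x]).length = n := by exact_mod_cast hfull
      simp only [if_pos hfull]
      have hrec := ih [] (buffer ++ [PySem.Str.join "\n" (cur ++ [x])]) (by simpa using hn)
      simp only [List.nil_append] at hrec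
      rw [hrec]
      rw [show cur ++ x :: xs = (cur ++ [x]) ++ xs by simp]
      rw [chunksOf_cons n hn ((cur ++ [x]) ++ xs) (by simp)]
      rw [show List.take n ((cur ++ [x]) ++ xs) = cur ++ [x] by rw [← hlen]; exact List.take_left]
      rw [show List.drop n ((cur ++ [x]) ++ xs) = xs by rw [← hlen]; exact List.drop_left]
      simp
    · have hlt : (cur ++ [x]).length < n := by
        have h2 : (cur ++ [x]).length ≠ n := fun h => hfull (by exact_mod_cast h)
        simp only [List.length_append, List.length_cons, List.length_nil] at h2 ⊢
        omega
      simp only [if_neg hfull]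
      have hrec := ih (cur ++ [x]) buffer hlt
      rw [show (cur ++ [x]) ++ xs = cur ++ x :: xs by simp] at hrec
      exact hrec

theorem a_eq_alt_pos (items : List String) (chunk_size : Int) (hpos : 0 < chunk_size) :
    chunked_lines items chunk_size = chunked_lines_alt items chunk_size := by
  obtain ⟨n, rfl⟩ : ∃ n : Nat, chunk_size = (n : Int) := ⟨chunk_size.toNat, by omega⟩
  have hn0 : 0 < n := by exact_mod_cast hpos
  rw [chunked_lines, chunked_lines_alt, if_neg (by omega : ¬ (n : Int) ≤ 0)]
  have hb := alt_aux items n hn0 0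
  simp only [Nat.cast_zero] at hb
  rw [hb]
  have ha := a_aux n hn0 items [] []
  simp only [List.nil_append] at ha
  exact ha (by simpa using hn0)

theorem a_nonpos_fold (chunk_size : Int) (hnp : chunk_size ≤ 0) :
    ∀ (xs cur buffer : List String),
      xs.foldl (fun (s : List String × List String) item =>
          let current := s.2 ++ [item]
          if (current.length : Int) = chunk_size then
            (s.1 ++ [PySem.Str.join "\n" current], [])
          else (s.1, current)) (buffer, cur)
      = (buffer, cur ++ xs) := by
  intro xs
  induction xs with
  | nil => intro cur buffer; simp
  | cons x xs ih =>
    intro cur buffer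
    simp only [List.foldl_cons]
    rw [if_neg (by
      have : 0 < (cur ++ [x]).length := by simp
      omega)]
    rw [ih (cur ++ [x]) buffer]
    simp

theorem a_eq_alt_nonpos (items : List String) (chunk_size : Int) (hnp : chunk_size ≤ 0) :
    chunked_lines items chunk_size = chunked_lines_alt items chunk_size := by
  rw [chunked_lines, chunked_lines_alt, if_pos hnp]
  simp only [a_nonpos_fold chunk_size hnp items [] [], List.nil_append]
  by_cases h : items = []
  · subst h; simp
  · simp [h]

-- ===== VERDICT (by name: the statement is the Claim_ definition above) =====
theorem chunked_lines_spec : Claim_equal_chunked_lines := by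
  intro items chunk_size _
  unfold Spec_chunked_lines
  by_cases h : chunk_size ≤ 0
  · exact a_eq_alt_nonpos items chunk_size h
  · exact a_eq_alt_pos items chunk_size (by omega)
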